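-- pv_equiv track=rewrite | github.com/SergioLV/training | hackerrank/minion_game.py | pointsWithVowels
-- ===== SOURCE A (Python) =====
-- def pointsWithVowels(string):
--     vowels = 'aeiou'
--     posible_words = []
--
--     left = 0
--     right = 0
--     i = 0
--
--     while i < len(string):
--         if string[i] in vowels:
--             left = i
--             right = i
--             while right <= len(string):
--                 posible_words.append(string[left:right])
--                 right += 1
--         left += 1
--         i += 1
--     score = calculateScore(string, posible_words)
--
--     return score
--
-- def calculateScore(string, posible_words):
--     word_count = {}
--     score = 0
--     for word in posible_words:
--         if word != '':
--             word_count[word] = 0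
--     for word in posible_words:
--         if word != '':
--             word_count[word] += 1
--
--     for key in word_count.keys():
--         score += word_count[key]
--
--     return score
-- ===== SOURCE B (Python) =====
-- def pointsWithVowels(string):
--     n = len(string)
--     return sum(n - i for i, ch in enumerate(string) if ch in 'aeiou')
-- ===== Notes on version B (the rewrite author's own statement) =====
-- stated objective: faster
-- what changed: Instead of materialising every substring starting at a vowel and counting them through a dict, B uses the closed form: each vowel at index i contributes exactly len(string)-i nonempty substrings, summed in one pass over enumerate(string).
import Mathlib
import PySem

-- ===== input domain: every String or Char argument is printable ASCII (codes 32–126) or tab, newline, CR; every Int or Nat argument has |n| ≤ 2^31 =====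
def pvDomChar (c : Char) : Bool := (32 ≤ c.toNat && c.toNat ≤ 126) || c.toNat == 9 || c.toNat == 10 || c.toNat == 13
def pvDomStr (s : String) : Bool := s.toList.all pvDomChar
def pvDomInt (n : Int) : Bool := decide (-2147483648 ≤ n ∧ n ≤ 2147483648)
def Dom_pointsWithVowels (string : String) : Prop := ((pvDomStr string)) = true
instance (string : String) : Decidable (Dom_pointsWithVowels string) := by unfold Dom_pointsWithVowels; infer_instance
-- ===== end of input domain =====

-- B replaces A's substring-list + dict counting by the closed form: a vowel at index i
-- contributes len(string)-i nonempty substrings, summed in one pass over enumerate(string).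


-- ===== PORT A =====
-- vowels = 'aeiou' ('string[i] in vowels' on a 1-char string is char membership)
def pvVowels : List Char := ['a', 'e', 'i', 'o', 'u']

-- literal port of calculateScore(string, posible_words); words are List Char (Python str slices)
def calculateScore (string : String) (posible_words : List (List Char)) : Int :=
  let word_count : PySem.Dict (List Char) Int :=
    posible_words.foldl (fun d word => if word ≠ [] then d.insert word 0 else d) PySem.Dict.empty
  let word_count : PySem.Dict (List Char) Int :=
    posible_words.foldl (fun d word => if word ≠ [] then d.insert word (d.getD word 0 + 1) else d)
      word_count
  word_count.keys.foldl (fun score key => score + word_count.getD key 0) 0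

-- the outer while counts i from 0 to len(string)-1; 'left' is re-set to i right before every
-- use, so the slice lower bound is i; the inner while counts right from i to len(string) incl.
def pointsWithVowels (string : String) : Int :=
  let s := string.toList
  let n : Int := PySem.Str.len string
  let posible_words : List (List Char) :=
    (PySem.List.pyRange 0 n 1).foldl (fun acc i =>
      if PySem.List.pyGetD s i ' ' ∈ pvVowels then
        (PySem.List.pyRange i (n + 1) 1).foldl
          (fun acc2 right => acc2 ++ [PySem.List.slice s (some i) (some right)]) acc
      else acc) []
  calculateScore string posible_words

-- ===== PORT B =====
def pointsWithVowels_alt (string : String) : Int :=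
  let n : Int := PySem.Str.len string
  (PySem.List.enumerate string.toList 0).foldl
    (fun acc p => if p.2 ∈ pvVowels then acc + (n - p.1) else acc) 0

-- ===== PRECONDITION & SPEC =====
def Spec_pointsWithVowels (string : String) (out : Int) : Prop := out = pointsWithVowels_alt string
instance (string : String) (out : Int) : Decidable (Spec_pointsWithVowels string out) := by unfold Spec_pointsWithVowels; infer_instance

-- ===== CLAIM (what is proved, stated in full; the proofs are below) =====
def Claim_equal_pointsWithVowels : Prop := ∀ (string : String), Dom_pointsWithVowels string → Spec_pointsWithVowels string (pointsWithVowels string)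

-- ===== LEMMAS AND PROOFS =====

-- inserting getD+1 raises the sum of the values by exactly 1 (items level)
theorem pv_sum_snd_insert_aux (l : List (List Char × Int)) (k : List Char)
    (h : (l.map (fun p => p.1)).Nodup) :
    ((PySem.Dict.mk l).insert k ((PySem.Dict.mk l).getD k 0 + 1)).values.sum
      = (l.map (fun p => p.2)).sum + 1 := by
  induction l with
  | nil => simp [PySem.Dict.insert, PySem.Dict.contains, PySem.Dict.getD, PySem.Dict.get?, PySem.Dict.values]
  | cons a t ih =>
    simp only [List.map_cons, List.nodup_cons] at h
    by_cases hk : a.1 = k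
    · subst hk
      simp only [PySem.Dict.insert, PySem.Dict.contains, PySem.Dict.getD, PySem.Dict.get?, PySem.Dict.values]
      simp
      have hmap : List.map ((fun x => x.2) ∘ fun p => if p.1 = a.1 then (a.1, a.2 + 1) else p) t
          = List.map (fun p => p.2) t := by
        refine List.map_congr_left (fun x hx => ?_)
        have : x.1 ≠ a.1 := by
          intro he; exact h.1 (he ▸ List.mem_map_of_mem hx)
        simp [Function.comp, this]
      rw [hmap]; ring
    · have hb : (a.1 == k) = false := by simpa using hk
      have ih' := ih h.2
      by_cases hc : (t.any fun p => p.1 == k) = true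
      all_goals
        simp only [PySem.Dict.insert, PySem.Dict.contains, PySem.Dict.getD, PySem.Dict.get?, PySem.Dict.values] at ih' ⊢
        simp [hb, hc, hk] at ih' ⊢
        omega

theorem pv_sum_snd_insert (d : PySem.Dict (List Char) Int) (k : List Char)
    (h : d.keys.Nodup) :
    ((d.insert k (d.getD k 0 + 1)).values).sum = d.values.sum + 1 := by
  rcases d with ⟨items⟩
  have h' : (items.map (fun p => p.1)).Nodup := by simpa [PySem.Dict.keys] using h
  simpa [PySem.Dict.values] using pv_sum_snd_insert_aux items k h'

-- the counting loop adds the number of processed words to the sum of the values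
theorem pv_sum_values_foldl_inc (l : List (List Char)) (d : PySem.Dict (List Char) Int)
    (h : d.keys.Nodup) :
    ((l.foldl (fun d w => d.insert w (d.getD w 0 + 1)) d).values).sum
      = d.values.sum + l.length := by
  induction l generalizing d with
  | nil => simp
  | cons a t ih =>
    simp only [List.foldl_cons, List.length_cons]
    rw [ih _ (PySem.Dict.nodup_keys_insert _ _ _ h), pv_sum_snd_insert _ _ h]
    push_cast; ring

-- inserting a zero only adds/keeps zero values
theorem pv_mem_values_insert_zero (d : PySem.Dict (List Char) Int) (k : List Char) (v : Int)
    (hv : v ∈ (d.insert k (0 : Int)).values) : v ∈ d.values ∨ v = 0 := by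
  rcases d with ⟨items⟩
  simp only [PySem.Dict.insert, PySem.Dict.values] at hv ⊢
  split_ifs at hv with hc
  · simp only [List.map_map, List.mem_map] at hv ⊢
    rcases hv with ⟨p, hp, hv⟩
    by_cases h1 : p.1 = k
    · right; simp [Function.comp, h1] at hv; omega
    · left; exact ⟨p, hp, by simpa [Function.comp, h1] using hv⟩
  · simp only [List.map_append, List.mem_append, List.map_cons] at hv
    rcases hv with hv | hv
    · left; exact hv
    · right; simpa using hv

-- the zero-initialisation loop only produces zero values
theorem pv_values_foldl_zero (l : List (List Char)) (d : PySem.Dict (List Char) Int)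
    (h : ∀ v ∈ d.values, v = 0) :
    ∀ v ∈ (l.foldl (fun d w => d.insert w (0 : Int)) d).values, v = 0 := by
  induction l generalizing d with
  | nil => simpa using h
  | cons a t ih =>
    simp only [List.foldl_cons]
    refine ih _ (fun v hv => ?_)
    rcases pv_mem_values_insert_zero d a v hv with h' | h'
    · exact h v h'
    · exact h'

-- calculateScore counts the nonempty words
theorem pv_calculateScore_eq (string : String) (l : List (List Char)) :
    calculateScore string l = ((l.filter (fun w => decide (w ≠ []))).length : Int) := by
  unfold calculateScore
  have e0 : (l.foldl (fun d word => if word ≠ [] then d.insert word 0 else d) PySem.Dict.empty)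
      = ((l.filter (fun w => decide (w ≠ []))).foldl (fun d w => d.insert w (0 : Int)) PySem.Dict.empty) := by
    rw [List.foldl_filter]; simp
  have e1 : ∀ d : PySem.Dict (List Char) Int,
      (l.foldl (fun d word => if word ≠ [] then d.insert word (d.getD word 0 + 1) else d) d)
      = ((l.filter (fun w => decide (w ≠ []))).foldl (fun d w => d.insert w (d.getD w 0 + 1)) d) := by
    intro d; rw [List.foldl_filter]; simp
  simp only [e1, e0]
  set lf := l.filter (fun w => decide (w ≠ [])) with hlf
  set d0 := lf.foldl (fun d w => d.insert w (0 : Int)) PySem.Dict.empty with hd0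
  set d1 := lf.foldl (fun d w => d.insert w (d.getD w 0 + 1)) d0 with hd1
  have hnd0 : d0.keys.Nodup := by
    rw [hd0]; exact PySem.Dict.nodup_keys_foldl_insert lf (fun _ _ => 0) _ PySem.Dict.nodup_keys_empty
  have hnd1 : d1.keys.Nodup := by
    rw [hd1]; exact PySem.Dict.nodup_keys_foldl_insert lf (fun d w => d.getD w 0 + 1) _ hnd0
  have hsum0 : d0.values.sum = 0 :=
    List.sum_eq_zero (pv_values_foldl_zero lf PySem.Dict.empty (by simp [PySem.Dict.empty, PySem.Dict.values]))
  rw [PySem.List.foldl_add d1.keys (fun k => d1.getD k 0) 0,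
      ← PySem.Dict.values_eq_map_keys d1 hnd1 0, hd1, pv_sum_values_foldl_inc lf d0 hnd0, hsum0]
  simp

-- a block of slices string[i:i..len] holds exactly len - i nonempty words
theorem pv_count_slices (s : List Char) (i : Int) (h0 : 0 ≤ i) (hn : i < (s.length : Int)) :
    List.countP (fun w => decide (w ≠ []))
      ((PySem.List.pyRange i ((s.length : Int) + 1) 1).map
        (fun r => PySem.List.slice s (some i) (some r)))
      = ((s.length : Int) - i).toNat := by
  rw [List.countP_map]
  rw [PySem.List.pyRange_one_append i (i+1) _ (by omega) (by omega)]
  rw [List.countP_append, PySem.List.pyRange_one_singleton]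
  have h1 : PySem.List.slice s (some i) (some i) = [] := by
    rw [PySem.List.slice_toNat s h0 h0]; simp
  have h2 : List.countP ((fun w => decide (w ≠ [])) ∘ fun r => PySem.List.slice s (some i) (some r))
      (PySem.List.pyRange (i+1) ((s.length : Int) + 1) 1)
      = (PySem.List.pyRange (i+1) ((s.length : Int) + 1) 1).length := by
    rw [List.countP_eq_length]
    intro r hr
    rw [PySem.List.mem_pyRange_one] at hr
    have hs : PySem.List.slice s (some i) (some r) ≠ [] := by
      rw [PySem.List.slice_toNat s h0 (by omega)]
      have : ((s.drop i.toNat).take (r.toNat - i.toNat)).length = min (r.toNat - i.toNat) (s.length - i.toNat) := by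
        simp
      intro hnil
      rw [hnil] at this
      simp at this
      omega
    simpa using hs
  rw [h2, PySem.List.length_pyRange_one]
  simp [h1]

-- the B-side enumeration sum, re-indexed over List.range
theorem pv_enum_sum (s : List Char) (c n : Int) :
    ((PySem.List.enumerate s c).map (fun p => if p.2 ∈ pvVowels then n - p.1 else 0)).sum
      = ((List.range s.length).map
          (fun k => if s.getD k ' ' ∈ pvVowels then n - (c + (k : Int)) else 0)).sum := by
  induction s generalizing c with
  | nil => simp [PySem.List.enumerate]
  | cons a t ih =>
    rw [PySem.List.enumerate_cons]
    simp only [List.map_cons, List.sum_cons, List.length_cons, List.range_succ_eq_map,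
      List.map_map, ih (c+1)]
    congr 1
    · simp
    · refine congrArg _ (List.map_congr_left fun k hk => ?_)
      simp [Function.comp, Nat.succ_eq_add_one]
      ring_nf

-- summing over a filtered list is summing an if-guarded term over the whole list
theorem pv_sum_map_filter (p : Int → Bool) (f : Int → Int) (l : List Int) :
    ((l.filter p).map f).sum = (l.map (fun i => if p i then f i else 0)).sum := by
  induction l with
  | nil => simp
  | cons a t ih =>
    by_cases h : p a <;> simp [h, ih]

theorem pv_main (string : String) : pointsWithVowels string = pointsWithVowels_alt string := by
  unfold pointsWithVowels pointsWithVowels_alt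
  simp only []
  set s := string.toList with hs
  have hlen : PySem.Str.len string = (s.length : Int) := by simp [PySem.Str.len_eq, hs]
  rw [hlen]
  set n : Int := (s.length : Int) with hn
  set P : Int → Bool := fun i => decide (PySem.List.pyGetD s i ' ' ∈ pvVowels) with hP
  set g : Int → List (List Char) :=
    fun i => (PySem.List.pyRange i (n + 1) 1).map (fun r => PySem.List.slice s (some i) (some r)) with hg
  -- A side: shape the word-building loop into filter + flatMap
  have hA : (PySem.List.pyRange 0 n 1).foldl (fun acc i =>
      if PySem.List.pyGetD s i ' ' ∈ pvVowels then
        (PySem.List.pyRange i (n + 1) 1).foldl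
          (fun acc2 right => acc2 ++ [PySem.List.slice s (some i) (some right)]) acc
      else acc) []
      = ((PySem.List.pyRange 0 n 1).filter P).flatMap g := by
    have e : (fun (acc : List (List Char)) i =>
        if PySem.List.pyGetD s i ' ' ∈ pvVowels then
          (PySem.List.pyRange i (n + 1) 1).foldl
            (fun acc2 right => acc2 ++ [PySem.List.slice s (some i) (some right)]) acc
        else acc)
        = (fun acc i => if P i = true then acc ++ g i else acc) := by
      funext acc i
      rw [PySem.List.foldl_append_singleton_eq_map]
      simp [hP, hg]
    rw [e, ← List.foldl_filter, PySem.List.foldl_append_eq_flatMap]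
    simp
  rw [hA, pv_calculateScore_eq]
  rw [List.filter_flatMap, List.length_flatMap]
  have hcnt : ((PySem.List.pyRange 0 n 1).filter P).map
        (fun i => (List.filter (fun w => decide (w ≠ [])) (g i)).length)
      = ((PySem.List.pyRange 0 n 1).filter P).map (fun i => (n - i).toNat) := by
    refine List.map_congr_left fun i hi => ?_
    have hi' := PySem.List.mem_pyRange_one.mp (List.mem_of_mem_filter hi)
    rw [hg, hn, ← List.countP_eq_length_filter]
    exact pv_count_slices s i hi'.1 (hn ▸ hi'.2)
  rw [hcnt, Nat.cast_list_sum, List.map_map]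
  have hcast : ((PySem.List.pyRange 0 n 1).filter P).map (Nat.cast ∘ fun i => (n - i).toNat)
      = ((PySem.List.pyRange 0 n 1).filter P).map (fun i => n - i) := by
    refine List.map_congr_left fun i hi => ?_
    have hi' := PySem.List.mem_pyRange_one.mp (List.mem_of_mem_filter hi)
    simp [Function.comp]
    omega
  rw [hcast, pv_sum_map_filter P (fun i => n - i)]
  -- B side: accumulate-then-sum, then index the enumeration
  have hB : (PySem.List.enumerate s 0).foldl
        (fun acc p => if p.2 ∈ pvVowels then acc + (n - p.1) else acc) 0
      = 0 + ((PySem.List.enumerate s 0).map (fun p => if p.2 ∈ pvVowels then n - p.1 else 0)).sum := by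
    rw [PySem.List.foldl_congr_mem _ _
      (fun acc p => acc + if p.2 ∈ pvVowels then n - p.1 else 0) 0
      (fun acc x _ => by by_cases hx : x.2 ∈ pvVowels <;> simp [hx])]
    exact PySem.List.foldl_add _ _ 0
  rw [hB, pv_enum_sum s 0 n, PySem.List.pyRange_one 0 n, List.map_map]
  simp only [Int.sub_zero, hn, Int.toNat_natCast, zero_add]
  refine congrArg List.sum (List.map_congr_left fun k hk => ?_)
  simp [hP, Function.comp]

-- ===== VERDICT (by name: the statement is the Claim_ definition above) =====
theorem pointsWithVowels_spec : Claim_equal_pointsWithVowels := by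
  intro string _
  unfold Spec_pointsWithVowels
  exact pv_main string
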